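-- pv_equiv track=rewrite | github.com/ramuuns/aoc | 2024/day09.py | part2
-- ===== SOURCE A (Python) =====
-- def part2(data):
--     block_id = 0
--     orig_idx_to_block_id = {}
--     for idx, size in enumerate(data):
--         orig_idx_to_block_id[idx] = block_id
--         block_id += size
--
--     checksum = []
--     endptr = len(data) - 1
--     if endptr % 2 == 1:
--         endptr -= 1
--     while endptr > 0:
--         size = data[endptr]
--         idx = 1
--         while idx < endptr and size > data[idx]:
--             idx += 2
--         if idx > endptr:
--             block_id = orig_idx_to_block_id[endptr]
--             for _ in range(0, size):
--                 checksum.append( block_id * (endptr // 2))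
--                 block_id += 1
--             endptr -= 2
--             continue
--         block_id = orig_idx_to_block_id[idx]
--         for _ in range(0, size):
--             checksum.append( block_id * (endptr // 2))
--             block_id += 1
--         orig_idx_to_block_id[idx] += size
--         data[idx] -= size
--         endptr -= 2
--     return sum(checksum)
-- ===== SOURCE B (Python) =====
-- def _tri(b, s):
--     # sum of the s block ids b, b+1, ..., b+s-1 (0 when s <= 0)
--     if s <= 0:
--         return 0
--     return s * b + s * (s - 1) // 2
--
-- def part2(data):
--     n = len(data)
--     starts = []
--     b = 0
--     for size in data:
--         starts.append(b)
--         b += size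
--     gaps = [[data[i], starts[i]] for i in range(1, n, 2)]
--     total = 0
--     f = (n - 1) // 2
--     while f > 0:
--         size = data[2 * f]
--         g = 0
--         while g < f and gaps[g][0] < size:
--             g += 1
--         if g < f:
--             rem, fill = gaps[g]
--             total += f * _tri(fill, size)
--             gaps[g] = [rem - size, fill + size]
--         else:
--             total += f * _tri(starts[2 * f], size)
--         f -= 1
--     return total
-- ===== Notes on version B (the rewrite author's own statement) =====
-- stated objective: faster
-- what changed: B computes each moved file's checksum contribution with a closed-form triangular-number formula instead of A's per-block append-to-list-then-sum loop, and keeps remaining-gap/next-id state in a separate table built once instead of mutating the input list and an index dict.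
import Mathlib
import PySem

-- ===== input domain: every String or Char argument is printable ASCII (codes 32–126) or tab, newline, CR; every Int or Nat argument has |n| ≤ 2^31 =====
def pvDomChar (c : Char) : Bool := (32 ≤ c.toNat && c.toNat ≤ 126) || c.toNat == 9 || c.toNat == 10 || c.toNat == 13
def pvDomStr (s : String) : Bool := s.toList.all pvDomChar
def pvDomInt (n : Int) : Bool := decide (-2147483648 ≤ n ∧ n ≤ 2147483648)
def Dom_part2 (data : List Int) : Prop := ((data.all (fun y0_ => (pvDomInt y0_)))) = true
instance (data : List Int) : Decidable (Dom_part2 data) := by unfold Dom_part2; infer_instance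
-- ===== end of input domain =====

-- B replaces A's per-block checksum list with a closed-form triangular sum per file and keeps the
-- gap state in a separate table instead of mutating the input and a dict; A mutates its `data`
-- argument in place (gap entries shrink), so the equivalence proved here is about the RETURN value only.

-- ===== PORT A =====
-- inner scan: `while idx < endptr and size > data[idx]: idx += 2`
def part2ScanA (data : List Int) (size endptr idx : Int) : Nat → Int
  | 0 => idx
  | fuel + 1 =>
    if idx < endptr ∧ size > PySem.List.pyGetD data idx 0 then
      part2ScanA data size endptr (idx + 2) fuel
    else idx

-- outer `while endptr > 0` loop; the `for _ in range(0, size)` append loop is the foldl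
def part2LoopA (data : List Int) (orig : PySem.Dict Int Int) (checksum : List Int)
    (endptr : Int) : Nat → List Int
  | 0 => checksum
  | fuel + 1 =>
  if endptr > 0 then
    let size := PySem.List.pyGetD data endptr 0
    let idx := part2ScanA data size endptr 1 data.length
    if idx > endptr then
      let block_id := orig.getD endptr 0
      let r := (PySem.List.pyRange 0 size 1).foldl
        (fun (st : List Int × Int) _ =>
          (st.1 ++ [st.2 * PySem.Int.floordiv endptr 2], st.2 + 1)) (checksum, block_id)
      part2LoopA data orig r.1 (endptr - 2) fuel
    else
      let block_id := orig.getD idx 0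
      let r := (PySem.List.pyRange 0 size 1).foldl
        (fun (st : List Int × Int) _ =>
          (st.1 ++ [st.2 * PySem.Int.floordiv endptr 2], st.2 + 1)) (checksum, block_id)
      let orig' := orig.modify idx 0 (· + size)
      let data' := PySem.List.pySetD data idx (PySem.List.pyGetD data idx 0 - size)
      part2LoopA data' orig' r.1 (endptr - 2) fuel
  else checksum

def part2 (data : List Int) : Int :=
  -- `for idx, size in enumerate(data): orig[idx] = block_id; block_id += size`
  let st := data.foldl
    (fun (st : PySem.Dict Int Int × Int × Int) size =>
      (st.1.insert st.2.1 st.2.2, st.2.1 + 1, st.2.2 + size))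
    (PySem.Dict.empty, 0, 0)
  let endptr0 := PySem.List.len data - 1
  let endptr := if PySem.Int.mod endptr0 2 = 1 then endptr0 - 1 else endptr0
  (part2LoopA data st.1 [] endptr data.length).sum

-- ===== PORT B =====
-- _tri(b, s): sum of the s block ids b .. b+s-1, in closed form
def triSum (b s : Int) : Int :=
  if s ≤ 0 then 0 else s * b + PySem.Int.floordiv (s * (s - 1)) 2

-- inner scan: `while g < f and gaps[g][0] < size: g += 1`
def part2ScanB (gaps : List (Int × Int)) (f : Int) (size : Int) (g : Int) : Nat → Int
  | 0 => g
  | fuel + 1 =>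
    if g < f ∧ (PySem.List.pyGetD gaps g (0, 0)).1 < size then
      part2ScanB gaps f size (g + 1) fuel
    else g

-- `while f > 0` countdown loop of Source B
def part2LoopB (data starts : List Int) (gaps : List (Int × Int)) (f : Int)
    (total : Int) : Nat → Int
  | 0 => total
  | fuel + 1 =>
  if f > 0 then
    let size := PySem.List.pyGetD data (2 * f) 0
    let g := part2ScanB gaps f size 0 gaps.length
    if g < f then
      let rem := (PySem.List.pyGetD gaps g (0, 0)).1
      let fill := (PySem.List.pyGetD gaps g (0, 0)).2
      part2LoopB data starts (PySem.List.pySetD gaps g (rem - size, fill + size)) (f - 1)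
        (total + f * triSum fill size) fuel
    else
      part2LoopB data starts gaps (f - 1)
        (total + f * triSum (PySem.List.pyGetD starts (2 * f) 0) size) fuel
  else total

def part2_alt (data : List Int) : Int :=
  let st := data.foldl (fun (st : List Int × Int) size => (st.1 ++ [st.2], st.2 + size)) ([], 0)
  let starts := st.1
  let gaps := (PySem.List.pyRange 1 (PySem.List.len data) 2).map
    (fun i => (PySem.List.pyGetD data i 0, PySem.List.pyGetD starts i 0))
  part2LoopB data starts gaps (PySem.Int.floordiv (PySem.List.len data - 1) 2) 0 data.length

-- ===== PRECONDITION & SPEC =====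
def Spec_part2 (data : List Int) (out : Int) : Prop := out = part2_alt data
instance (data : List Int) (out : Int) : Decidable (Spec_part2 data out) := by
  unfold Spec_part2; infer_instance

-- ===== CLAIM (what is proved, stated in full; the proofs are below) =====
def Claim_equal_part2 : Prop := ∀ (data : List Int), Dom_part2 data → Spec_part2 data (part2 data)

-- ===== LEMMAS AND PROOFS =====

-- prefix sum of the original sizes: the block id where segment i starts
def pvPref (d0 : List Int) (i : Nat) : Int := ((d0.take i).sum)

-- the triangular sum satisfies the "one more block" recurrence
theorem triSum_succ (b : Int) (m : Nat) :
    triSum b ((m : Int) + 1) = b + triSum (b + 1) (m : Int) := by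
  unfold triSum
  rw [PySem.Int.floordiv_eq_ediv_of_pos (by norm_num)]
  rcases Nat.eq_zero_or_pos m with h | h
  · subst h; norm_num
  · rw [if_neg (by omega), if_neg (by omega),
      PySem.Int.floordiv_eq_ediv_of_pos (by norm_num)]
    obtain ⟨c, hc⟩ : Even (((m:Int)) * ((m:Int) + 1)) := Int.even_mul_succ_self _
    obtain ⟨c', hc'⟩ : Even ((((m:Int)) - 1) * (((m:Int) - 1) + 1)) := Int.even_mul_succ_self _
    have e1 : ((m:Int) + 1) * ((m:Int) + 1 - 1) = c + c := by rw [← hc]; ring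
    have e2 : ((m:Int)) * ((m:Int) - 1) = c' + c' := by rw [← hc']; ring
    rw [e1, e2]
    have d1 : (c + c) / 2 = c := by omega
    have d2 : (c' + c') / 2 = c' := by omega
    rw [d1, d2]
    nlinarith [e1, e2]

theorem appendFold_sum (q : Int) (l : List Int) :
    ∀ (cs : List Int) (b : Int),
    ((l.foldl (fun (st : List Int × Int) _ => (st.1 ++ [st.2 * q], st.2 + 1)) (cs, b)).1).sum
      = cs.sum + q * triSum b (l.length : Int) := by
  induction l with
  | nil => intro cs b; simp [triSum]
  | cons x t ih =>
      intro cs b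
      rw [List.foldl_cons, ih]
      have : ((x :: t).length : Int) = (t.length : Int) + 1 := by simp
      rw [this, triSum_succ]
      simp; ring

-- A's append loop over range(0, size) sums to q * triSum b size
theorem appendLoop_sum (size : Int) (cs : List Int) (b q : Int) :
    (((PySem.List.pyRange 0 size 1).foldl
      (fun (st : List Int × Int) _ => (st.1 ++ [st.2 * q], st.2 + 1)) (cs, b)).1).sum
    = cs.sum + q * triSum b size := by
  rw [appendFold_sum, PySem.List.length_pyRange_one]
  rcases (by omega : size ≤ 0 ∨ 0 < size) with h | h
  · have h0 : ((size - 0).toNat : Int) = 0 := by omega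
    rw [h0]; simp [triSum, h]
  · have h0 : ((size - 0).toNat : Int) = size := by omega
    rw [h0]

-- characterisation of B's `starts` list
theorem starts_fold (l : List Int) :
    ∀ (acc : List Int) (b : Int),
    (l.foldl (fun (st : List Int × Int) size => (st.1 ++ [st.2], st.2 + size)) (acc, b)).1
    = acc ++ (List.range l.length).map (fun i => b + (l.take i).sum) := by
  induction l with
  | nil => intro acc b; simp
  | cons s t ih =>
      intro acc b
      rw [List.foldl_cons, ih]
      rw [List.length_cons, List.range_succ_eq_map]
      simp [List.map_map, Function.comp_def, List.take_succ_cons, add_assoc]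

-- characterisation of A's dict of original block ids
theorem dict_fold_getD (l : List Int) :
    ∀ (d : PySem.Dict Int Int) (j b : Int) (k : Int),
    ((l.foldl (fun (st : PySem.Dict Int Int × Int × Int) size =>
        (st.1.insert st.2.1 st.2.2, st.2.1 + 1, st.2.2 + size)) (d, j, b)).1).getD k 0
    = if j ≤ k ∧ k < j + l.length then b + (l.take (k - j).toNat).sum else d.getD k 0 := by
  induction l with
  | nil =>
      intro d j b k
      rw [List.foldl_nil, if_neg (by simp)]
  | cons s t ih =>
      intro d j b k
      rw [List.foldl_cons]
      dsimp only
      rw [ih, PySem.Dict.getD_insert]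
      rw [List.length_cons]
      split_ifs with h1 h2 h3 h4 h5
      · have hn : (k - j).toNat = (k - (j + 1)).toNat + 1 := by omega
        rw [hn, List.take_succ_cons]
        simp; ring
      · push_cast at *; omega
      · have hn : ((k:Int) - j).toNat = 0 := by omega
        rw [hn, List.take_zero]
        simp
      · push_cast at *; omega
      · push_cast at *; omega
      · rfl

-- the invariant tying A's mutated (data, orig) to B's gap table, over original input d0
def pvInv (d0 data : List Int) (orig : PySem.Dict Int Int) (gaps : List (Int × Int)) : Prop :=
  data.length = d0.length ∧ gaps.length = d0.length / 2 ∧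
  (∀ g : Nat, g < d0.length / 2 →
    data.getD (2 * g + 1) 0 = (gaps.getD g (0, 0)).1 ∧
    orig.getD ((2 * g + 1 : Nat) : Int) 0 = (gaps.getD g (0, 0)).2) ∧
  (∀ k : Nat, 2 * k < d0.length →
    data.getD (2 * k) 0 = d0.getD (2 * k) 0 ∧
    orig.getD ((2 * k : Nat) : Int) 0 = pvPref d0 (2 * k))

-- a finished scan step: once the loop condition fails, any fuel returns idx
theorem scanA_stop (data : List Int) (size endptr idx : Int)
    (h : ¬ (idx < endptr ∧ size > PySem.List.pyGetD data idx 0)) :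
    ∀ fa : Nat, part2ScanA data size endptr idx fa = idx := by
  intro fa
  cases fa with
  | zero => rfl
  | succ fa => rw [part2ScanA, if_neg h]

theorem scanB_stop (gaps : List (Int × Int)) (f size g : Int)
    (h : ¬ (g < f ∧ (PySem.List.pyGetD gaps g (0, 0)).1 < size)) :
    ∀ fb : Nat, part2ScanB gaps f size g fb = g := by
  intro fb
  cases fb with
  | zero => rfl
  | succ fb => rw [part2ScanB, if_neg h]

-- the two inner scans agree: A's odd-index pointer is 2g+1 for B's gap counter g
theorem scan_agree (d0 data : List Int) (orig : PySem.Dict Int Int)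
    (gaps : List (Int × Int)) (hInv : pvInv d0 data orig gaps) (size : Int) (F : Nat)
    (hF : 2 * F < d0.length) :
    ∀ g0 : Nat, g0 ≤ F → ∀ fa fb : Nat, F - g0 ≤ fa → F - g0 ≤ fb →
      part2ScanA data size ((2 * F : Nat) : Int) ((2 * g0 + 1 : Nat) : Int) fa
      = 2 * part2ScanB gaps (F : Int) size ((g0 : Nat) : Int) fb + 1 := by
  obtain ⟨hlen, hglen, hodd, heven⟩ := hInv
  suffices H : ∀ k : Nat, ∀ g0 : Nat, g0 ≤ F → F - g0 ≤ k →
      ∀ fa fb : Nat, F - g0 ≤ fa → F - g0 ≤ fb →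
      part2ScanA data size ((2 * F : Nat) : Int) ((2 * g0 + 1 : Nat) : Int) fa
      = 2 * part2ScanB gaps (F : Int) size ((g0 : Nat) : Int) fb + 1 by
    intro g0 hg0; exact H (F - g0) g0 hg0 le_rfl
  intro k
  induction k with
  | zero =>
      intro g0 hg0 hk fa fb hfa hfb
      have hg : g0 = F := by omega
      subst hg
      rw [scanA_stop _ _ _ _ (by push_cast; omega), scanB_stop _ _ _ _ (by omega)]
      push_cast; ring
  | succ k ih =>
      intro g0 hg0 hk fa fb hfa hfb
      by_cases hlt : g0 < F
      · have hgap : PySem.List.pyGetD data ((2 * g0 + 1 : Nat) : Int) 0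
            = (PySem.List.pyGetD gaps ((g0 : Nat) : Int) (0, 0)).1 := by
          rw [PySem.List.pyGetD_natCast, PySem.List.pyGetD_natCast]
          exact (hodd g0 (by omega)).1
        by_cases hsz : (PySem.List.pyGetD gaps ((g0 : Nat) : Int) (0, 0)).1 < size
        · cases fa with
          | zero => exact absurd hfa (by omega)
          | succ fa =>
            cases fb with
            | zero => exact absurd hfb (by omega)
            | succ fb =>
              rw [part2ScanA, part2ScanB,
                if_pos (⟨by push_cast; omega, by rw [hgap]; exact hsz⟩),
                if_pos (⟨by omega, hsz⟩)]
              have e1 : ((2 * g0 + 1 : Nat) : Int) + 2 = ((2 * (g0 + 1) + 1 : Nat) : Int) := by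
                push_cast; ring
              have e2 : ((g0 : Nat) : Int) + 1 = ((g0 + 1 : Nat) : Int) := by push_cast; ring
              rw [e1, e2]
              exact ih (g0 + 1) (by omega) (by omega) fa fb (by omega) (by omega)
        · rw [scanA_stop _ _ _ _ (by rw [hgap]; intro h; exact hsz h.2),
            scanB_stop _ _ _ _ (by intro h; exact hsz h.2)]
          push_cast; ring
      · have hg : g0 = F := by omega
        subst hg
        rw [scanA_stop _ _ _ _ (by push_cast; omega), scanB_stop _ _ _ _ (by omega)]
        push_cast; ring

-- B's scan lands on a Nat counter between its start and f
theorem scanB_bounds (gaps : List (Int × Int)) (size : Int) (F : Nat) :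
    ∀ fb : Nat, ∀ g0 : Nat, g0 ≤ F →
      ∃ g : Nat, part2ScanB gaps (F : Int) size ((g0 : Nat) : Int) fb = (g : Int) ∧
        g0 ≤ g ∧ g ≤ F := by
  intro fb
  induction fb with
  | zero =>
      intro g0 hg0
      exact ⟨g0, rfl, le_rfl, hg0⟩
  | succ fb ih =>
      intro g0 hg0
      by_cases h : ((g0 : Nat) : Int) < (F : Int) ∧
          (PySem.List.pyGetD gaps ((g0 : Nat) : Int) (0, 0)).1 < size
      · rw [part2ScanB, if_pos h]
        have e2 : ((g0 : Nat) : Int) + 1 = ((g0 + 1 : Nat) : Int) := by push_cast; ring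
        rw [e2]
        obtain ⟨g, hg, h1, h2⟩ := ih (g0 + 1) (by have h1 := h.1; omega)
        exact ⟨g, hg, by omega, h2⟩
      · rw [part2ScanB, if_neg h]
        exact ⟨g0, rfl, le_rfl, hg0⟩

-- cast adapter: Nat-indexed getD through pySetD at a Nat-cast index
theorem getD_pySetD_nat {α : Type} (xs : List α) (n m : Nat) (v d : α) (h : n < xs.length) :
    (PySem.List.pySetD xs ((n : Nat) : Int) v).getD m d = if m = n then v else xs.getD m d := by
  rw [← PySem.List.pyGetD_natCast (xs := PySem.List.pySetD xs ((n : Nat) : Int) v) (n := m) (d := d),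
    PySem.List.pyGetD_pySetD_natCast _ _ _ _ _ h, PySem.List.pyGetD_natCast]

theorem loopA_nonpos (data : List Int) (orig : PySem.Dict Int Int) (cs : List Int)
    (e : Int) (h : ¬ e > 0) : ∀ fuel : Nat, part2LoopA data orig cs e fuel = cs := by
  intro fuel
  cases fuel with
  | zero => rfl
  | succ fuel => rw [part2LoopA, if_neg h]

theorem loopB_nonpos (data starts : List Int) (gaps : List (Int × Int)) (f total : Int)
    (h : ¬ f > 0) : ∀ fuel : Nat, part2LoopB data starts gaps f total fuel = total := by
  intro fuel
  cases fuel with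
  | zero => rfl
  | succ fuel => rw [part2LoopB, if_neg h]

theorem main_loop (d0 starts : List Int)
    (hst : ∀ i : Nat, i < d0.length → starts.getD i 0 = pvPref d0 i) :
    ∀ F : Nat, ∀ (data : List Int) (orig : PySem.Dict Int Int)
      (gaps : List (Int × Int)) (cs : List Int) (fa fb : Nat),
      (F = 0 ∨ 2 * F < d0.length) → F ≤ fa → F ≤ fb → pvInv d0 data orig gaps →
      (part2LoopA data orig cs ((2 * F : Nat) : Int) fa).sum
        = part2LoopB d0 starts gaps ((F : Nat) : Int) cs.sum fb := by
  intro F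
  induction F with
  | zero =>
      intro data orig gaps cs fa fb _ _ _ _
      rw [loopA_nonpos _ _ _ _ (by norm_num) fa, loopB_nonpos _ _ _ _ _ (by norm_num) fb]
  | succ F ih =>
      intro data orig gaps cs fa fb hF hfa hfb hInv
      have hn : 2 * (F + 1) < d0.length := by omega
      cases fa with
      | zero => exact absurd hfa (by omega)
      | succ fa =>
      cases fb with
      | zero => exact absurd hfb (by omega)
      | succ fb =>
      obtain ⟨hlen, hglen, hodd, heven⟩ := hInv
      -- the size read by A equals the size read by B (even entries never change)
      have hsz : PySem.List.pyGetD data ((2 * (F + 1) : Nat) : Int) 0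
          = d0.getD (2 * (F + 1)) 0 := by
        rw [PySem.List.pyGetD_natCast]
        exact (heven (F + 1) hn).1
      set sz := d0.getD (2 * (F + 1)) 0 with hszdef
      -- the scans agree
      obtain ⟨g, hgeq, -, hgle⟩ := scanB_bounds gaps sz (F + 1) gaps.length 0 (by omega)
      rw [Nat.cast_zero] at hgeq

      have hscan : part2ScanA data sz ((2 * (F + 1) : Nat) : Int) 1 data.length
          = ((2 * g + 1 : Nat) : Int) := by
        have h0 : (1 : Int) = ((2 * 0 + 1 : Nat) : Int) := by norm_num
        rw [h0, scan_agree d0 data orig gaps ⟨hlen, hglen, hodd, heven⟩ sz (F + 1) hn 0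
          (by omega) data.length gaps.length (by omega) (by omega)]
        rw [Nat.cast_zero, hgeq]; push_cast; ring
      -- A's floordiv endptr 2 is F+1
      have hq : PySem.Int.floordiv ((2 * (F + 1) : Nat) : Int) 2 = ((F + 1 : Nat) : Int) := by
        rw [(by norm_num : (2 : Int) = ((2 : Nat) : Int)), PySem.Int.floordiv_natCast]
        norm_num
      have hBsz : PySem.List.pyGetD d0 (2 * ((F + 1 : Nat) : Int)) 0 = sz := by
        rw [(by push_cast; ring : 2 * ((F + 1 : Nat) : Int) = ((2 * (F + 1) : Nat) : Int)),
          PySem.List.pyGetD_natCast]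
      have hBstep : part2ScanB gaps ((F + 1 : Nat) : Int)
          (PySem.List.pyGetD d0 (2 * ((F + 1 : Nat) : Int)) 0) 0 gaps.length = (g : Int) := by
        rw [hBsz, hgeq]
      rw [part2LoopA, if_pos (by push_cast; omega)]
      dsimp only
      rw [hsz, hscan, hq]
      by_cases hfit : g < F + 1
      · -- a gap fits: A's else branch, B's then branch
        rw [if_neg (by push_cast; omega)]
        have hgl : g < d0.length / 2 := by omega
        have hrem : PySem.List.pyGetD data ((2 * g + 1 : Nat) : Int) 0
            = (gaps.getD g (0, 0)).1 := by
          rw [PySem.List.pyGetD_natCast]; exact (hodd g hgl).1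
        have hfill : orig.getD ((2 * g + 1 : Nat) : Int) 0 = (gaps.getD g (0, 0)).2 :=
          (hodd g hgl).2
        have hgapsg : PySem.List.pyGetD gaps ((g : Nat) : Int) (0, 0) = gaps.getD g (0, 0) :=
          PySem.List.pyGetD_natCast ..
        have hB : part2LoopB d0 starts gaps ((F + 1 : Nat) : Int) cs.sum (fb + 1)
            = part2LoopB d0 starts
              (PySem.List.pySetD gaps ((g : Nat) : Int)
                ((gaps.getD g (0, 0)).1 - sz, (gaps.getD g (0, 0)).2 + sz))
              ((F : Nat) : Int)
              (cs.sum + ((F + 1 : Nat) : Int) * triSum ((gaps.getD g (0, 0)).2) sz) fb := by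
          rw [part2LoopB, if_pos (by push_cast; omega)]
          dsimp only
          rw [hBstep, if_pos (by push_cast; omega), hgapsg, hBsz,
            (by push_cast; ring : ((F + 1 : Nat) : Int) - 1 = ((F : Nat) : Int))]
        rw [hfill, hrem]
        rw [(by push_cast; ring : ((2 * (F + 1) : Nat) : Int) - 2 = ((2 * F : Nat) : Int))]
        -- the updated states still satisfy the invariant
        have hInv' : pvInv d0
            (PySem.List.pySetD data ((2 * g + 1 : Nat) : Int) ((gaps.getD g (0, 0)).1 - sz))
            (orig.modify ((2 * g + 1 : Nat) : Int) 0 (· + sz))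
            (PySem.List.pySetD gaps ((g : Nat) : Int)
              ((gaps.getD g (0, 0)).1 - sz, (gaps.getD g (0, 0)).2 + sz)) := by
          refine ⟨by rw [PySem.List.length_pySetD]; exact hlen, by rw [PySem.List.length_pySetD]; exact hglen, ?_, ?_⟩
          · intro g' hg'
            constructor
            · rw [getD_pySetD_nat _ _ _ _ _ (by omega),
                getD_pySetD_nat _ _ _ _ _ (by omega)]
              by_cases he : g' = g
              · rw [if_pos (by omega), if_pos he]
              · rw [if_neg (by omega), if_neg he]
                exact (hodd g' hg').1
            · rw [PySem.Dict.getD_modify,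
                getD_pySetD_nat _ _ _ _ _ (by omega)]
              by_cases he : g' = g
              · subst he
                rw [if_pos rfl, if_pos rfl, (hodd g' hg').2]
              · rw [if_neg (by intro hcc; rw [Nat.cast_inj] at hcc; omega), if_neg he]
                exact (hodd g' hg').2
          · intro k hk
            constructor
            · rw [getD_pySetD_nat _ _ _ _ _ (by omega), if_neg (by omega)]
              exact (heven k hk).1
            · rw [PySem.Dict.getD_modify_of_ne _ _ _ (by intro hcc; rw [Nat.cast_inj] at hcc; omega)]
              exact (heven k hk).2
        rw [ih _ _ _ _ fa fb (by omega) (by omega) (by omega) hInv']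
        rw [appendLoop_sum, hB]
      · -- no gap fits: A's then branch, B's else branch
        have hgF : g = F + 1 := by omega
        subst hgF
        rw [if_pos (by push_cast; omega)]
        have hbid : orig.getD ((2 * (F + 1) : Nat) : Int) 0 = pvPref d0 (2 * (F + 1)) :=
          (heven (F + 1) hn).2
        have hstB : PySem.List.pyGetD starts (2 * ((F + 1 : Nat) : Int)) 0
            = pvPref d0 (2 * (F + 1)) := by
          rw [(by push_cast; ring : 2 * ((F + 1 : Nat) : Int) = ((2 * (F + 1) : Nat) : Int)),
            PySem.List.pyGetD_natCast]
          exact hst (2 * (F + 1)) hn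
        have hB : part2LoopB d0 starts gaps ((F + 1 : Nat) : Int) cs.sum (fb + 1)
            = part2LoopB d0 starts gaps ((F : Nat) : Int)
              (cs.sum + ((F + 1 : Nat) : Int) * triSum (pvPref d0 (2 * (F + 1))) sz) fb := by
          rw [part2LoopB, if_pos (by push_cast; omega)]
          dsimp only
          rw [hBstep, if_neg (by push_cast; omega), hBsz, hstB,
            (by push_cast; ring : ((F + 1 : Nat) : Int) - 1 = ((F : Nat) : Int))]
        rw [hbid]
        rw [(by push_cast; ring : ((2 * (F + 1) : Nat) : Int) - 2 = ((2 * F : Nat) : Int))]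
        rw [ih data orig gaps _ fa fb (by omega) (by omega) (by omega) ⟨hlen, hglen, hodd, heven⟩]
        rw [appendLoop_sum, hB]

theorem part2_eq (data : List Int) : part2 data = part2_alt data := by
  rw [part2, part2_alt]
  rw [PySem.List.len_eq]
  rw [starts_fold data [] 0, List.nil_append]
  set n := data.length with hn
  set starts := (List.range n).map (fun i => (0 : Int) + (data.take i).sum) with hstarts
  have hst : ∀ i : Nat, i < n → starts.getD i 0 = pvPref data i := by
    intro i hi
    rw [hstarts, PySem.List.getD_map_range _ _ _ _ hi, pvPref, zero_add]
  by_cases hn0 : n = 0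
  · rw [loopA_nonpos _ _ _ _ (by rw [hn0]; decide) _,
      loopB_nonpos _ _ _ _ _ (by rw [hn0]; decide) _]
    simp
  · -- n ≥ 1
    set F0 := (n - 1) / 2 with hF0
    have hcast : ((n : Int) - 1) = ((n - 1 : Nat) : Int) := by omega
    have hA_end : (if PySem.Int.mod ((n : Int) - 1) 2 = 1 then (n : Int) - 1 - 1
        else (n : Int) - 1) = ((2 * F0 : Nat) : Int) := by
      rw [hcast, (by norm_num : (2:Int) = ((2:Nat):Int)), PySem.Int.mod_natCast]
      split_ifs with h
      · have : (n - 1) % 2 = 1 := by exact_mod_cast h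
        omega
      · have : ¬ (n - 1) % 2 = 1 := by intro hc; apply h; exact_mod_cast hc
        omega
    have hB_f : PySem.Int.floordiv ((n : Int) - 1) 2 = ((F0 : Nat) : Int) := by
      rw [hcast, (by norm_num : (2:Int) = ((2:Nat):Int)), PySem.Int.floordiv_natCast]
    rw [hA_end, hB_f]
    -- initial dict characterisation
    have horig : ∀ k : Nat, k < n →
        ((data.foldl (fun (st : PySem.Dict Int Int × Int × Int) size =>
          (st.1.insert st.2.1 st.2.2, st.2.1 + 1, st.2.2 + size))
          (PySem.Dict.empty, 0, 0)).1).getD ((k : Nat) : Int) 0 = pvPref data k := by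
      intro k hk
      rw [dict_fold_getD, if_pos (by constructor <;> [omega; (push_cast; omega)])]
      rw [pvPref]
      norm_num
    -- initial gaps characterisation
    have hcnt : (if (1:Int) < (n:Int) then ((((n:Int)) - 1 + 2 - 1)/2).toNat else 0) = n / 2 := by
      split_ifs with h <;> omega
    have hgaps : (PySem.List.pyRange 1 (n : Int) 2).map
        (fun i => (PySem.List.pyGetD data i 0, PySem.List.pyGetD starts i 0))
        = (List.range (n / 2)).map (fun g =>
            (data.getD (2 * g + 1) 0, starts.getD (2 * g + 1) 0)) := by
      rw [PySem.List.pyRange_of_pos _ _ (by norm_num), hcnt, List.map_map]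
      apply List.map_congr_left
      intro g hg
      rw [List.mem_range] at hg
      dsimp only [Function.comp]
      rw [(by push_cast; ring : (1 : Int) + 2 * (g : Int) = ((2 * g + 1 : Nat) : Int)),
        PySem.List.pyGetD_natCast, PySem.List.pyGetD_natCast]
    rw [hgaps]
    have hInv0 : pvInv data data
        ((data.foldl (fun (st : PySem.Dict Int Int × Int × Int) size =>
          (st.1.insert st.2.1 st.2.2, st.2.1 + 1, st.2.2 + size))
          (PySem.Dict.empty, 0, 0)).1)
        ((List.range (n / 2)).map (fun g =>
            (data.getD (2 * g + 1) 0, starts.getD (2 * g + 1) 0))) := by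
      refine ⟨rfl, by simp [← hn], ?_, ?_⟩
      · intro g hg
        rw [PySem.List.getD_map_range _ _ _ _ hg]
        exact ⟨rfl, by rw [horig _ (by omega), hst _ (by omega)]⟩
      · intro k hk
        exact ⟨rfl, horig _ (by omega)⟩
    have := main_loop data starts hst F0 data _ _ [] data.length data.length (by omega) (by omega) (by omega) hInv0
    rw [this, List.sum_nil]

-- ===== VERDICT (by name: the statement is the Claim_ definition above) =====
theorem part2_spec : Claim_equal_part2 := by
  intro data _
  unfold Spec_part2
  exact part2_eq data
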